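-- pv_equiv track=rewrite | github.com/lcleow/Kattis | pikemaneasy.py | calctime
-- ===== SOURCE A (Python) =====
-- def calctime(t, timelist):
--     totalt, penalty, problems = 0, 0, 0
--     for item in timelist:
--         if totalt + item > t:
--             return problems, penalty
--         totalt += item
--         problems += 1
--         penalty = (penalty + totalt)%1000000007
--     return problems, penalty
-- ===== SOURCE B (Python) =====
-- def calctime(t, timelist):
--     # Stage 1: number of solvable problems = steps before the time budget goes negative.
--     remaining = t
--     k = 0
--     for x in timelist:
--         remaining -= x
--         if remaining < 0:
--             break
--         k += 1
--     # Stage 2: closed-form penalty: the i-th solved time (0-based) contributes to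
--     # (k - i) of the k prefix sums, so penalty = sum((k - i) * x_i) mod 1e9+7.
--     penalty = sum((k - i) * x for i, x in enumerate(timelist[:k])) % 1000000007
--     return k, penalty
-- ===== Notes on version B (the rewrite author's own statement) =====
-- stated objective: alternative
-- what changed: Instead of accumulating a running total and a per-step modular penalty in one fused early-return loop, B first counts solvable problems by decrementing the remaining time budget, then computes the penalty without any prefix sums via the closed-form weighting sum((k-i)*x_i) % MOD, since the i-th solved time appears in exactly k-i of the k prefix sums.
import Mathlib
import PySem

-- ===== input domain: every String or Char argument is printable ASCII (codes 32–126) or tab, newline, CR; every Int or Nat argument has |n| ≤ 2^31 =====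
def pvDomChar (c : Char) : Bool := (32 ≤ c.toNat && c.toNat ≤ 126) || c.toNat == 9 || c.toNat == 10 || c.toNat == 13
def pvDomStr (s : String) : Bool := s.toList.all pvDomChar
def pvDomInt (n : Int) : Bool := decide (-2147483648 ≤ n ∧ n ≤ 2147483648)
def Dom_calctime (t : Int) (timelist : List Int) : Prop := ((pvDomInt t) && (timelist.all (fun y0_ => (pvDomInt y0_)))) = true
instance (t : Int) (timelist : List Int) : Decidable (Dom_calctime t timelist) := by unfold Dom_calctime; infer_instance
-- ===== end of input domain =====

-- B splits A's fused early-return loop into two stages: count solvable problems by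
-- decrementing the remaining budget, then penalty by the closed-form weighting
-- sum((k-i)*x_i) % MOD (no prefix sums kept).


-- ===== PORT A =====
-- A's for-loop with early return, carried as structural recursion over (totalt, penalty, problems)
def calctimeLoopA (t : Int) : List Int → Int → Int → Int → Int × Int
  | [], _, penalty, problems => (problems, penalty)
  | item :: rest, totalt, penalty, problems =>
    if totalt + item > t then (problems, penalty)
    else calctimeLoopA t rest (totalt + item)
          (PySem.Int.mod (penalty + (totalt + item)) 1000000007) (problems + 1)

def calctime (t : Int) (timelist : List Int) : Int × Int :=
  calctimeLoopA t timelist 0 0 0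

-- ===== PORT B =====
-- Stage 1 of Source B: the budget-decrementing counting loop (remaining, k), as structural recursion
def countSolvable (remaining : Int) : List Int → Int
  | [] => 0
  | x :: xs => if remaining - x < 0 then 0 else 1 + countSolvable (remaining - x) xs

def calctime_alt (t : Int) (timelist : List Int) : Int × Int :=
  let k := countSolvable t timelist
  -- timelist[:k] with k ≥ 0 is take; sum((k - i) * x for i, x in enumerate(...))
  let penalty := PySem.Int.mod
      (((PySem.List.enumerate (timelist.take k.toNat) 0).map (fun p => (k - p.1) * p.2)).sum)
      1000000007
  (k, penalty)

-- ===== PRECONDITION & SPEC =====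
def Spec_calctime (t : Int) (timelist : List Int) (out : Int × Int) : Prop := out = calctime_alt t timelist
instance (t : Int) (timelist : List Int) (out : Int × Int) : Decidable (Spec_calctime t timelist out) := by unfold Spec_calctime; infer_instance

-- ===== CLAIM (what is proved, stated in full; the proofs are below) =====
def Claim_equal_calctime : Prop := ∀ (t : Int) (timelist : List Int), Dom_calctime t timelist → Spec_calctime t timelist (calctime t timelist)

-- ===== LEMMAS AND PROOFS =====
theorem mod_mod_add (p y : Int) :
    PySem.Int.mod (PySem.Int.mod p 1000000007 + y) 1000000007 =
      PySem.Int.mod (p + y) 1000000007 := by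
  simp only [PySem.Int.mod_eq_emod_of_pos (by norm_num : (0:Int) < 1000000007),
    Int.emod_add_emod]

theorem countSolvable_nonneg (l : List Int) : ∀ r, 0 ≤ countSolvable r l := by
  induction l with
  | nil => intro r; simp [countSolvable]
  | cons x xs ih =>
    intro r
    simp only [countSolvable]
    split_ifs
    · omega
    · have := ih (r - x); omega

-- shifting the enumerate start by 1 is the same as lowering the weight base by 1
theorem enum_shift (l : List Int) (k : Int) : ∀ s,
    ((PySem.List.enumerate l (s + 1)).map (fun p => (k - p.1) * p.2)).sum =
      ((PySem.List.enumerate l s).map (fun p => ((k - 1) - p.1) * p.2)).sum := by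
  induction l with
  | nil => intro s; simp [PySem.List.enumerate_nil]
  | cons x xs ih =>
    intro s
    simp only [PySem.List.enumerate_cons, List.map_cons, List.sum_cons, ih (s + 1)]
    ring_nf

-- main invariant: A's loop from state (totalt, mod p, q) returns B's two-stage answer
theorem loopA_eq (t : Int) (l : List Int) :
    ∀ (totalt p q : Int),
      calctimeLoopA t l totalt (PySem.Int.mod p 1000000007) q =
        (q + countSolvable (t - totalt) l,
         PySem.Int.mod
           (p + countSolvable (t - totalt) l * totalt +
             ((PySem.List.enumerate (l.take (countSolvable (t - totalt) l).toNat) 0).map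
               (fun pr => (countSolvable (t - totalt) l - pr.1) * pr.2)).sum)
           1000000007) := by
  induction l with
  | nil =>
    intro totalt p q
    simp [calctimeLoopA, countSolvable, PySem.List.enumerate_nil]
  | cons x xs ih =>
    intro totalt p q
    by_cases h : totalt + x > t
    · have hx : t - totalt - x < 0 := by omega
      simp [calctimeLoopA, countSolvable, h, hx, PySem.List.enumerate_nil]
    · have hx : ¬ (t - totalt - x < 0) := by omega
      have hk' := countSolvable_nonneg xs (t - totalt - x)
      set k' := countSolvable (t - totalt - x) xs with hkdef
      simp only [calctimeLoopA, if_neg h, mod_mod_add]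
      rw [ih (totalt + x) (p + (totalt + x)) (q + 1)]
      have hcount : countSolvable (t - totalt) (x :: xs) = 1 + k' := by
        simp [countSolvable, hx, hkdef]
      have htak : (1 + k').toNat = k'.toNat + 1 := by omega
      rw [hcount, htak]
      have hsub : t - (totalt + x) = t - totalt - x := by ring
      rw [hsub, ← hkdef]
      simp only [List.take_succ_cons, PySem.List.enumerate_cons, List.map_cons, List.sum_cons]
      rw [enum_shift]
      rw [Prod.mk.injEq]
      refine ⟨by omega, ?_⟩
      have he : (1 + k' - 1 : Int) = k' := by ring
      rw [he]
      congr 1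
      ring

-- ===== VERDICT (by name: the statement is the Claim_ definition above) =====
theorem calctime_spec : Claim_equal_calctime := by
  intro t timelist _
  unfold Spec_calctime calctime calctime_alt
  have h := loopA_eq t timelist 0 0 0
  simp only [sub_zero] at h
  rw [show PySem.Int.mod 0 1000000007 = 0 by decide] at h
  rw [h]
  simp
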